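-- pv_equiv track=rewrite | github.com/zura7cinco7/GOA | day 021/classwork/classwork13.py | upper_and_lower
-- ===== SOURCE A (Python) =====
-- def upper_and_lower(text):
--     upper_index = 1
--
--     result = ""
--
--     for i in text:
--         if upper_index == 3:
--             result += i.upper()
--             upper_index = 0
--         else:
--             result += i.lower()
--
--         upper_index += 1
--     return result
-- ===== SOURCE B (Python) =====
-- def upper_and_lower(text):
--     # B: process the string in chunks of three instead of a per-character counter
--     parts = []
--     for j in range(0, len(text), 3):
--         chunk = text[j:j+3]
--         if len(chunk) == 3:
--             parts.append(chunk[0].lower() + chunk[1].lower() + chunk[2].upper())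
--         else:
--             parts.append(''.join(ch.lower() for ch in chunk))
--     return ''.join(parts)
-- ===== Notes on version B (the rewrite author's own statement) =====
-- stated objective: alternative
-- what changed: B walks the string in chunks of three (lowercasing each chunk and uppercasing its third character) instead of maintaining a per-character modular counter.
import Mathlib
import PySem

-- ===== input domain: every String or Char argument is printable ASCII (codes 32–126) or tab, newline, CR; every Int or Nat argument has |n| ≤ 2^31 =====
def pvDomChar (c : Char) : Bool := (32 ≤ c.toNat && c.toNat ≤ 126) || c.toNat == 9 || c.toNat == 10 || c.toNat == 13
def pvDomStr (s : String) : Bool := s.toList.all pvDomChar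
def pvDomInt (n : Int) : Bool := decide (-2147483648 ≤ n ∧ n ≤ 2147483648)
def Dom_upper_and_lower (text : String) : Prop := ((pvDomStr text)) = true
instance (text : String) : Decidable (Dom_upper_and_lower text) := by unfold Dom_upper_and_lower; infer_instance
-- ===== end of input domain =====

-- B rewrites the per-character modular counter as a chunk-of-three traversal (alternative decomposition, same cost).

-- ===== PORT A =====
-- A: one pass with a counter upper_index starting at 1; uppercase when it hits 3, then reset.
def upper_and_lower (text : String) : String :=
  let st := text.toList.foldl
    (fun (st : Int × List Char) i =>
      if st.1 == 3 then (0 + 1, st.2 ++ [PySem.Chars.upperChar i])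
      else (st.1 + 1, st.2 ++ [PySem.Chars.lowerChar i]))
    (1, [])
  String.mk st.2

-- ===== PORT B =====
-- B: split into chunks of three; lowercase a chunk, uppercasing its third char when it has one.
def upper_and_lower_altGo : List Char → List Char
  | a :: b :: c :: rest =>
      PySem.Chars.lowerChar a :: PySem.Chars.lowerChar b :: PySem.Chars.upperChar c ::
        upper_and_lower_altGo rest
  | l => l.map PySem.Chars.lowerChar

def upper_and_lower_alt (text : String) : String :=
  String.mk (upper_and_lower_altGo text.toList)

-- ===== PRECONDITION & SPEC =====
def Spec_upper_and_lower (text : String) (out : String) : Prop := out = upper_and_lower_alt text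
instance (text : String) (out : String) : Decidable (Spec_upper_and_lower text out) := by unfold Spec_upper_and_lower; infer_instance

-- ===== CLAIM (what is proved, stated in full; the proofs are below) =====
def Claim_equal_upper_and_lower : Prop := ∀ (text : String), Dom_upper_and_lower text → Spec_upper_and_lower text (upper_and_lower text)

-- ===== LEMMAS AND PROOFS =====
theorem foldA_eq_chunks : ∀ (l acc : List Char),
    (l.foldl
      (fun (st : Int × List Char) i =>
        if st.1 == 3 then (0 + 1, st.2 ++ [PySem.Chars.upperChar i])
        else (st.1 + 1, st.2 ++ [PySem.Chars.lowerChar i]))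
      (1, acc)).2 = acc ++ upper_and_lower_altGo l
  | [], acc => by simp [upper_and_lower_altGo]
  | [a], acc => by simp [List.foldl, upper_and_lower_altGo]
  | [a, b], acc => by simp [List.foldl, upper_and_lower_altGo]
  | a :: b :: c :: rest, acc => by
      have h := foldA_eq_chunks rest
        (acc ++ [PySem.Chars.lowerChar a, PySem.Chars.lowerChar b, PySem.Chars.upperChar c])
      simp only [List.foldl] at h ⊢
      norm_num at h ⊢
      rw [h]
      simp [upper_and_lower_altGo]

-- ===== VERDICT (by name: the statement is the Claim_ definition above) =====
theorem upper_and_lower_spec : Claim_equal_upper_and_lower := by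
  intro text _
  unfold Spec_upper_and_lower upper_and_lower upper_and_lower_alt
  show String.mk (List.foldl _ (1, []) text.toList).2 = _
  rw [foldA_eq_chunks]
  simp
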